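-- pv_equiv track=rewrite | github.com/onkelhoy/2dv50e-thesis | work/Code/Integration/Layers/layers.py | group_related_images
-- ===== SOURCE A (Python) =====
-- class UnionFind:
--     """
--     A simple Union-Find class to manage a collection of disjoint sets.
--     """
--
--     def __init__(self):
--         """
--         Initializes the Union-Find structure.
--         """
--         self.parent = {}
--
--     def find(self, item):
--         """
--         Finds and returns the root of the set containing the item.
--         """
--         if self.parent[item] != item:
--             self.parent[item] = self.find(self.parent[item])
--         return self.parent[item]
--
--     def union(self, item1, item2):
--         """
--         Merges the sets that have item1 and item2.
--         """
--         root1 = self.find(item1)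
--         root2 = self.find(item2)
--         if root1 != root2:
--             self.parent[root2] = root1
--
--     def add(self, item):
--         """
--         Adds an item.
--         """
--         if item not in self.parent:
--             self.parent[item] = item
--
-- def group_related_images(tuples):
--     """
--     Group all related duplicate image pairs into clusters.
--     """
--     uf = UnionFind()
--     for group in tuples:
--         if isinstance(group, (list, tuple)):
--             for i in range(len(group) - 1):
--                 for j in range(i + 1, len(group)):
--                     uf.add(group[i])
--                     uf.add(group[j])
--                     uf.union(group[i], group[j])
--         else:
--             uf.add(group)
--             uf.union(group, group)
--
--     groups = {}
--     for image in uf.parent: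
--         root = uf.find(image)
--         if root not in groups:
--             groups[root] = []
--         groups[root].append(image)
--     return list(groups.values())
-- ===== SOURCE B (Python) =====
-- def group_related_images(tuples):
--     """
--     Group all related duplicate image pairs into clusters.
--
--     Different strategy from the all-pairs union-find original: walk each group
--     once, chaining only CONSECUTIVE elements (k-1 merges instead of k*(k-1)/2
--     unions), and merge classes by direct relabelling (smaller class into the
--     larger), with no parent forest and no find().
--     """
--     label = {}     # element -> current class id
--     members = {}   # class id -> its elements (entries of dead ids are stale)
--     order = []     # distinct elements in first-appearance order
--     next_id = 0
--     for group in tuples: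
--         if len(group) < 2:      # a pair list shorter than 2 relates nothing
--             continue
--         prev = None
--         for x in group:
--             if x not in label:
--                 label[x] = next_id
--                 members[next_id] = [x]
--                 order.append(x)
--                 next_id += 1
--             if prev is not None:
--                 a, b = label[prev], label[x]
--                 if a != b:
--                     if len(members[a]) < len(members[b]):
--                         a, b = b, a
--                     for y in members[b]:
--                         label[y] = a
--                     members[a] = members[a] + members[b]
--             prev = x
--     clusters = {}
--     for x in order:
--         clusters.setdefault(label[x], []).append(x)
--     return list(clusters.values())
-- ===== Notes on version B (the rewrite author's own statement) =====
-- stated objective: faster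
-- what changed: B drops the all-pairs union-find (k*(k-1)/2 unions per group, recursive find with path compression) and instead walks each group once, chaining only consecutive elements (k-1 merges) and merging classes by directly relabelling the smaller class's members, so no parent forest and no find() at all.
import Mathlib
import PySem

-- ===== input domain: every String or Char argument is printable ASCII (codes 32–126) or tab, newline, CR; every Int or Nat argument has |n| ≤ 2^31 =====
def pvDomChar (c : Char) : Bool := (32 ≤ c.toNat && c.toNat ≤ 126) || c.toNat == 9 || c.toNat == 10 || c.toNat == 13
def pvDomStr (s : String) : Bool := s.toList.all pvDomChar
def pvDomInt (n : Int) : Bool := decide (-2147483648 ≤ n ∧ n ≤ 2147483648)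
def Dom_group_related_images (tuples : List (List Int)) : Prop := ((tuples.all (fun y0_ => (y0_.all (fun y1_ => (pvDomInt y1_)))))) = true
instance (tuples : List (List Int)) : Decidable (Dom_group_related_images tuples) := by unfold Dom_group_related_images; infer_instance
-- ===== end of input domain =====

-- B replaces the all-pairs union-find (k*(k-1)/2 unions per group, recursive find with
-- path compression) by a single left-to-right walk chaining consecutive elements only
-- (k-1 merges) that merges classes by direct relabelling — no parent forest, no find.

-- ===== PORT A =====
-- UnionFind.find: recursive with path compression.  The fuel (`size+1` at every call
-- site) is only a termination guard: on the parent forests this program builds the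
-- recursion depth is at most the number of keys, so fuel is never exhausted.  The
-- `getD x x` default mirrors that `find` is only ever reached on present keys.
def pvFind : Nat → PySem.Dict Int Int → Int → PySem.Dict Int Int × Int
  | 0, parent, x => (parent, x)
  | fuel + 1, parent, x =>
    let p := parent.getD x x
    if p ≠ x then
      let r := pvFind fuel parent p
      (r.1.insert x r.2, r.2)
    else (parent, x)

-- UnionFind.union
def pvUnion (parent : PySem.Dict Int Int) (a b : Int) : PySem.Dict Int Int :=
  let f1 := pvFind (parent.size + 1) parent a
  let f2 := pvFind (f1.1.size + 1) f1.1 b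
  if f1.2 ≠ f2.2 then f2.1.insert f2.2 f1.2 else f2.1

-- UnionFind.add
def pvAdd (parent : PySem.Dict Int Int) (x : Int) : PySem.Dict Int Int :=
  if parent.contains x then parent else parent.insert x x

-- Under the declared type every `group` is a list, so Python's `isinstance` test is
-- always true and its else-branch is dead code.
def group_related_images (tuples : List (List Int)) : List (List Int) :=
  let parent := tuples.foldl (fun P g =>
    (PySem.List.pyRange 0 (PySem.List.len g - 1)).foldl (fun P i =>
      (PySem.List.pyRange (i + 1) (PySem.List.len g)).foldl (fun P j =>
        let gi := PySem.List.pyGetD g i 0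
        let gj := PySem.List.pyGetD g j 0
        pvUnion (pvAdd (pvAdd P gi) gj) gi gj) P) P) PySem.Dict.empty
  let fin := parent.keys.foldl
    (fun (st : PySem.Dict Int Int × PySem.Dict Int (List Int)) image =>
      let f := pvFind (st.1.size + 1) st.1 image
      let G := if (st.2.get? f.2).isNone then st.2.insert f.2 ([] : List Int) else st.2
      (f.1, G.modify f.2 [] (· ++ [image])))
    (parent, PySem.Dict.empty)
  fin.2.values

-- ===== PORT B =====
structure BState where
  label : PySem.Dict Int Int          -- element -> current class id
  members : PySem.Dict Int (List Int) -- class id -> its elements (dead ids stay stale)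
  order : List Int                    -- distinct elements in first-appearance order
  nextId : Int

def bAddNew (s : BState) (x : Int) : BState :=
  if s.label.contains x then s
  else ⟨s.label.insert x s.nextId, s.members.insert s.nextId [x],
        s.order ++ [x], s.nextId + 1⟩

def bMerge (s : BState) (prev x : Int) : BState :=
  let a := s.label.getD prev 0
  let b := s.label.getD x 0
  if a ≠ b then
    let ab := if (s.members.getD a []).length < (s.members.getD b []).length
              then (b, a) else (a, b)
    let label' := (s.members.getD ab.2 []).foldl (fun L y => L.insert y ab.1) s.label
    ⟨label', s.members.insert ab.1 (s.members.getD ab.1 [] ++ s.members.getD ab.2 []),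
     s.order, s.nextId⟩
  else s

def bGroup (s : BState) (g : List Int) : BState :=
  if g.length < 2 then s
  else (g.foldl (fun (t : BState × Option Int) x =>
         let s1 := bAddNew t.1 x
         let s2 := match t.2 with
           | some p => bMerge s1 p x
           | none => s1
         (s2, some x)) (s, none)).1

def group_related_images_alt (tuples : List (List Int)) : List (List Int) :=
  let s := tuples.foldl bGroup ⟨PySem.Dict.empty, PySem.Dict.empty, [], 0⟩
  (s.order.foldl (fun (C : PySem.Dict Int (List Int)) x =>
      let k := s.label.getD x 0
      (C.setdefault k []).modify k [] (· ++ [x])) PySem.Dict.empty).values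

-- ===== PRECONDITION & SPEC =====
def Spec_group_related_images (tuples : List (List Int)) (out : List (List Int)) : Prop := out = group_related_images_alt tuples
instance (tuples : List (List Int)) (out : List (List Int)) : Decidable (Spec_group_related_images tuples out) := by unfold Spec_group_related_images; infer_instance

-- ===== CLAIM (what is proved, stated in full; the proofs are below) =====
def Claim_equal_group_related_images : Prop := ∀ (tuples : List (List Int)), Dom_group_related_images tuples → Spec_group_related_images tuples (group_related_images tuples)

-- ===== LEMMAS AND PROOFS =====

/-! ### The A-side abstraction: roots of the parent forest -/

def IsRoot (P : PySem.Dict Int Int) (x : Int) : Prop := P.getD x x = x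

def rootF : Nat → PySem.Dict Int Int → Int → Int
  | 0, _, x => x
  | fuel + 1, P, x => if P.getD x x = x then x else rootF fuel P (P.getD x x)

def proot (P : PySem.Dict Int Int) (x : Int) : Int := rootF P.size P x

/-- well-formed union-find state: unique keys, parent pointers stay inside the
key set, and every chain of parent pointers reaches a root. -/
def Good (P : PySem.Dict Int Int) : Prop :=
  P.keys.Nodup ∧ (∀ x ∈ P.keys, P.getD x x ∈ P.keys) ∧
    (∀ x, ∃ n, IsRoot P (rootF n P x))

lemma size_eq_keys_length (P : PySem.Dict Int Int) : P.size = P.keys.length := by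
  simp [PySem.Dict.keys, PySem.Dict.size]

lemma rootF_of_isRoot {P : PySem.Dict Int Int} {x : Int} (h : IsRoot P x) (n : Nat) :
    rootF n P x = x := by
  have h' : P.getD x x = x := h
  induction n with
  | zero => rfl
  | succ n ih => simp [rootF, h']

lemma rootF_add (P : PySem.Dict Int Int) (m n : Nat) (x : Int) :
    rootF (m + n) P x = rootF n P (rootF m P x) := by
  induction m generalizing x with
  | zero => simp [rootF]
  | succ m ih =>
    by_cases h : P.getD x x = x
    · have hr : IsRoot P x := h
      simp [rootF_of_isRoot hr]
    · have hmn : m + 1 + n = (m + n) + 1 := by omega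
      have hstep : ∀ k, rootF (k + 1) P x = rootF k P (P.getD x x) := by
        intro k; simp [rootF, h]
      rw [hmn, hstep (m + n), ih, hstep m]

lemma rootF_stab {P : PySem.Dict Int Int} {x : Int} {m : Nat}
    (h : IsRoot P (rootF m P x)) {n : Nat} (hmn : m ≤ n) :
    rootF n P x = rootF m P x := by
  have : n = m + (n - m) := by omega
  rw [this, rootF_add]
  exact rootF_of_isRoot h _

lemma isRoot_of_not_mem {P : PySem.Dict Int Int} {x : Int} (h : x ∉ P.keys) :
    IsRoot P x := by
  have hc : P.contains x = false := by
    by_contra hcc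
    exact h ((PySem.Dict.contains_iff_mem_keys P x).1 (by simpa using hcc))
  exact PySem.Dict.getD_of_not_contains P x hc

lemma mem_of_step_ne {P : PySem.Dict Int Int} {x : Int} (h : P.getD x x ≠ x) :
    x ∈ P.keys := by
  by_contra hx
  exact h (isRoot_of_not_mem hx)

lemma rootF_mem {P : PySem.Dict Int Int}
    (hcl : ∀ x ∈ P.keys, P.getD x x ∈ P.keys) {x : Int} (hx : x ∈ P.keys) (n : Nat) :
    rootF n P x ∈ P.keys := by
  induction n generalizing x with
  | zero => exact hx
  | succ n ih =>
    by_cases h : P.getD x x = x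
    · simpa [rootF, h] using hx
    · simpa [rootF, h] using ih (hcl x hx)

lemma rootF_succ_step {P : PySem.Dict Int Int} {x : Int} (n : Nat)
    (h : ¬ IsRoot P (rootF n P x)) :
    rootF (n + 1) P x = P.getD (rootF n P x) (rootF n P x) := by
  rw [rootF_add P n 1]
  simp [rootF, h]
  intro hh; exact absurd hh h

/-- chains reach a root within `size` steps -/
lemma rootF_size_isRoot {P : PySem.Dict Int Int} (hG : Good P) (x : Int) :
    IsRoot P (rootF P.size P x) := by
  by_cases hx : x ∈ P.keys
  · have hex : ∃ n, IsRoot P (rootF n P x) := hG.2.2 x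
    haveI : DecidablePred fun n => IsRoot P (rootF n P x) := fun _ => Classical.dec _
    have hroot : IsRoot P (rootF (Nat.find hex) P x) := Nat.find_spec hex
    have hmin : ∀ i, i < Nat.find hex → ¬ IsRoot P (rootF i P x) :=
      fun i hi => Nat.find_min hex hi
    set h := Nat.find hex with hh
    have hmem : ∀ i, i ≤ h → rootF i P x ∈ P.keys := by
      intro i hi
      induction i with
      | zero => simpa [rootF] using hx
      | succ i ih =>
        rw [rootF_succ_step i (hmin i (by omega))]
        exact hG.2.1 _ (ih (by omega))
    have hper : ∀ i j, i < j → j ≤ h → rootF i P x = rootF j P x →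
        ∀ k, rootF (i + k * (j - i)) P x = rootF i P x := by
      intro i j hij hjh heq k
      induction k with
      | zero => simp
      | succ k ih =>
        have harith : i + (k + 1) * (j - i) = (i + k * (j - i)) + (j - i) := by
          rw [Nat.succ_mul]; omega
        rw [harith, rootF_add, ih, ← rootF_add]
        have : i + (j - i) = j := by omega
        rw [this, ← heq]
    have hinj : ∀ i j, i < j → j ≤ h → rootF i P x ≠ rootF j P x := by
      intro i j hij hjh heq
      have h1 := hper i j hij hjh heq h
      have h2 : rootF (i + h * (j - i)) P x = rootF h P x := by
        apply rootF_stab hroot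
        have : 1 ≤ j - i := by omega
        calc h ≤ h * (j - i) := by nlinarith
        _ ≤ i + h * (j - i) := by omega
      exact hmin i (by omega) (by rw [← h1, h2]; exact hroot)
    have hnd : ((List.range (h + 1)).map (fun i => rootF i P x)).Nodup := by
      refine List.Nodup.map_on ?_ (List.nodup_range)
      intro i hi j hj hfe
      simp only [List.mem_range] at hi hj
      by_contra hne
      rcases Nat.lt_or_ge i j with hlt | hge
      · exact hinj i j hlt (by omega) hfe
      · have : j < i := by omega
        exact hinj j i this (by omega) hfe.symm
    have hsub : ∀ z ∈ (List.range (h + 1)).map (fun i => rootF i P x), z ∈ P.keys := by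
      intro z hz
      simp only [List.mem_map, List.mem_range] at hz
      obtain ⟨i, hi, rfl⟩ := hz
      exact hmem i (by omega)
    have hlen : h + 1 ≤ P.keys.length := by
      have h1 : ((List.range (h + 1)).map (fun i => rootF i P x)).toFinset.card =
          h + 1 := by
        rw [List.toFinset_card_of_nodup hnd]; simp
      have h2 : ((List.range (h + 1)).map (fun i => rootF i P x)).toFinset ⊆
          P.keys.toFinset := by
        intro z hz
        simp only [List.mem_toFinset] at hz ⊢
        exact hsub z hz
      calc h + 1 = _ := h1.symm
        _ ≤ P.keys.toFinset.card := Finset.card_le_card h2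
        _ ≤ P.keys.length := P.keys.toFinset_card_le
    have : h ≤ P.size := by rw [size_eq_keys_length]; omega
    rw [rootF_stab hroot this]
    exact hroot
  · have hr := isRoot_of_not_mem hx
    rw [rootF_of_isRoot hr]
    exact hr

lemma proot_isRoot {P : PySem.Dict Int Int} (hG : Good P) (x : Int) :
    IsRoot P (proot P x) := rootF_size_isRoot hG x

lemma rootF_eq_proot {P : PySem.Dict Int Int} (hG : Good P) {x : Int} {n : Nat}
    (h : IsRoot P (rootF n P x)) : rootF n P x = proot P x := by
  rcases Nat.le_total n P.size with hle | hle
  · exact (rootF_stab h hle).symm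
  · exact rootF_stab (rootF_size_isRoot hG x) hle

lemma proot_of_isRoot {P : PySem.Dict Int Int} {x : Int} (h : IsRoot P x) :
    proot P x = x := rootF_of_isRoot h _

lemma proot_step {P : PySem.Dict Int Int} (hG : Good P) {x : Int}
    (h : P.getD x x ≠ x) : proot P x = proot P (P.getD x x) := by
  obtain ⟨n, hn⟩ := hG.2.2 (P.getD x x)
  have h1 : rootF (1 + n) P x = rootF n P (P.getD x x) := by
    rw [rootF_add]; simp [rootF, h]
  have : IsRoot P (rootF (1 + n) P x) := by rw [h1]; exact hn
  rw [← rootF_eq_proot hG this, h1, rootF_eq_proot hG hn]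

lemma proot_mem {P : PySem.Dict Int Int} (hG : Good P) {x : Int} (hx : x ∈ P.keys) :
    proot P x ∈ P.keys := rootF_mem hG.2.1 hx _

lemma proot_not_mem {P : PySem.Dict Int Int} {x : Int} (hx : x ∉ P.keys) :
    proot P x = x := proot_of_isRoot (isRoot_of_not_mem hx)

/-! ### Effect of the primitive operations on the abstraction -/

/-- inserting `x ↦ r` (r a root) merges x's class into r's; covers both path
compression (`r = proot P x`) and the union step (`x` a root). -/
lemma insert_root_spec {P : PySem.Dict Int Int} {x r : Int} (hG : Good P)
    (hx : x ∈ P.keys) (hr : IsRoot P r) (hrm : r ∈ P.keys) (hne : x ≠ r)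
    (hcase : proot P x = x ∨ r = proot P x) :
    (P.insert x r).keys = P.keys ∧ Good (P.insert x r) ∧
      ∀ y, proot (P.insert x r) y =
        if proot P y = proot P x then r else proot P y := by
  have hrx : r ≠ x := hne.symm
  have hkeys : (P.insert x r).keys = P.keys :=
    PySem.Dict.keys_insert_of_contains P r ((PySem.Dict.contains_iff_mem_keys P x).2 hx)
  have hstep : ∀ z, (P.insert x r).getD z z = if z = x then r else P.getD z z := by
    intro z; rw [PySem.Dict.getD_insert]
  have hrootr' : IsRoot (P.insert x r) r := by
    show (P.insert x r).getD r r = r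
    rw [hstep]; simp [hrx]; exact hr
  -- the chain from x in the new dict: one step to r, which is a root
  have hchainx : IsRoot (P.insert x r) (rootF 2 (P.insert x r) x) ∧
      rootF 2 (P.insert x r) x = r := by
    have h1 : (P.insert x r).getD x x = r := by rw [hstep]; simp
    have h2 : rootF 2 (P.insert x r) x = rootF 1 (P.insert x r) r := by
      have hd : rootF 2 (P.insert x r) x =
          if (P.insert x r).getD x x = x then x
          else rootF 1 (P.insert x r) ((P.insert x r).getD x x) := rfl
      rw [hd, h1, if_neg hrx]
    have h3 : rootF 1 (P.insert x r) r = r := rootF_of_isRoot hrootr' 1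
    exact ⟨by rw [h2, h3]; exact hrootr', by rw [h2, h3]⟩
  have hRCase : ∀ y, IsRoot P y →
      ∃ m, IsRoot (P.insert x r) (rootF m (P.insert x r) y) ∧
        rootF m (P.insert x r) y = (if proot P y = proot P x then r else proot P y) := by
    intro y hy
    by_cases hyx : y = x
    · subst hyx
      refine ⟨2, hchainx.1, ?_⟩
      rw [hchainx.2, if_pos rfl]
    · have hroot' : IsRoot (P.insert x r) y := by
        show (P.insert x r).getD y y = y
        rw [hstep]; simp [hyx]; exact hy
      refine ⟨0, by simpa [rootF] using hroot', ?_⟩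
      have hpy : proot P y = y := proot_of_isRoot hy
      simp only [rootF, hpy]
      split_ifs with hc
      · -- y = proot P x; then the right disjunct of hcase forces r = y
        rcases hcase with hcl | hcr
        · exact absurd (hc.trans hcl) hyx
        · rw [hcr, hc]
      · rfl
  have main : ∀ n y, IsRoot P (rootF n P y) →
      ∃ m, IsRoot (P.insert x r) (rootF m (P.insert x r) y) ∧
        rootF m (P.insert x r) y = (if proot P y = proot P x then r else proot P y) := by
    intro n
    induction n with
    | zero => intro y hy; exact hRCase y (by simpa [rootF] using hy)
    | succ n ih =>
      intro y hy
      by_cases hyroot : IsRoot P y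
      · exact hRCase y hyroot
      · by_cases hyx : y = x
        · subst hyx
          refine ⟨2, hchainx.1, ?_⟩
          rw [hchainx.2, if_pos rfl]
        · have hpne : P.getD y y ≠ y := hyroot
          have hy' : IsRoot P (rootF n P (P.getD y y)) := by
            have : rootF (n + 1) P y = rootF n P (P.getD y y) := by
              simp [rootF, hpne]
            rwa [this] at hy
          obtain ⟨m, hm1, hm2⟩ := ih (P.getD y y) hy'
          have hstepy : (P.insert x r).getD y y = P.getD y y := by
            rw [hstep]; simp [hyx]
          have hch : rootF (m + 1) (P.insert x r) y = rootF m (P.insert x r) (P.getD y y) := by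
            have : ¬ (P.insert x r).getD y y = y := by rw [hstepy]; exact hpne
            simp only [rootF, hstepy]
            rw [if_neg hpne]
          refine ⟨m + 1, by rw [hch]; exact hm1, ?_⟩
          rw [hch, hm2, proot_step hG hpne]
  have hGood : Good (P.insert x r) := by
    refine ⟨hkeys ▸ hG.1, ?_, ?_⟩
    · intro z hz
      rw [hkeys] at hz ⊢
      rw [hstep]
      split_ifs with hzx
      · exact hrm
      · exact hG.2.1 z hz
    · intro y
      obtain ⟨n, hn⟩ := hG.2.2 y
      obtain ⟨m, hm, _⟩ := main n y hn
      exact ⟨m, hm⟩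
  refine ⟨hkeys, hGood, fun y => ?_⟩
  obtain ⟨n, hn⟩ := hG.2.2 y
  obtain ⟨m, hm1, hm2⟩ := main n y hn
  rw [← rootF_eq_proot hGood hm1, hm2]

lemma add_spec {P : PySem.Dict Int Int} {x : Int} (hG : Good P) (hx : x ∉ P.keys) :
    (P.insert x x).keys = P.keys ++ [x] ∧ Good (P.insert x x) ∧
      ∀ y, proot (P.insert x x) y = proot P y := by
  have hc : P.contains x = false := by
    rw [PySem.Dict.contains_eq_decide_mem_keys]; simpa using hx
  have hkeys : (P.insert x x).keys = P.keys ++ [x] :=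
    PySem.Dict.keys_insert_of_not_contains P x hc
  have hstep : ∀ z, (P.insert x x).getD z z = if z = x then x else P.getD z z := by
    intro z; rw [PySem.Dict.getD_insert]
  have hrootx : IsRoot (P.insert x x) x := by
    show (P.insert x x).getD x x = x
    rw [hstep]; simp
  have main : ∀ n y, IsRoot P (rootF n P y) →
      ∃ m, IsRoot (P.insert x x) (rootF m (P.insert x x) y) ∧
        rootF m (P.insert x x) y = proot P y := by
    intro n
    induction n with
    | zero =>
      intro y hy
      have hy' : IsRoot P y := by simpa [rootF] using hy
      by_cases hyx : y = x
      · subst hyx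
        exact ⟨0, by simpa [rootF] using hrootx, by simp [rootF, proot_of_isRoot hy']⟩
      · have : IsRoot (P.insert x x) y := by
          show (P.insert x x).getD y y = y
          rw [hstep]; simp [hyx]; exact hy'
        exact ⟨0, by simpa [rootF] using this, by simp [rootF, proot_of_isRoot hy']⟩
    | succ n ih =>
      intro y hy
      by_cases hyroot : IsRoot P y
      · by_cases hyx : y = x
        · subst hyx
          exact ⟨0, by simpa [rootF] using hrootx, by simp [rootF, proot_of_isRoot hyroot]⟩
        · have : IsRoot (P.insert x x) y := by
            show (P.insert x x).getD y y = y
            rw [hstep]; simp [hyx]; exact hyroot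
          exact ⟨0, by simpa [rootF] using this, by simp [rootF, proot_of_isRoot hyroot]⟩
      · have hpne : P.getD y y ≠ y := hyroot
        have hyk : y ∈ P.keys := mem_of_step_ne hpne
        have hyx : y ≠ x := fun he => hx (he ▸ hyk)
        have hy' : IsRoot P (rootF n P (P.getD y y)) := by
          have : rootF (n + 1) P y = rootF n P (P.getD y y) := by simp [rootF, hpne]
          rwa [this] at hy
        obtain ⟨m, hm1, hm2⟩ := ih (P.getD y y) hy'
        have hstepy : (P.insert x x).getD y y = P.getD y y := by
          rw [hstep]; simp [hyx]
        have hch : rootF (m + 1) (P.insert x x) y = rootF m (P.insert x x) (P.getD y y) := by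
          simp only [rootF, hstepy]
          rw [if_neg hpne]
        refine ⟨m + 1, by rw [hch]; exact hm1, ?_⟩
        rw [hch, hm2, proot_step hG hpne]
  have hGood : Good (P.insert x x) := by
    refine ⟨PySem.Dict.nodup_keys_insert P x x hG.1, ?_, ?_⟩
    · intro z hz
      rw [hkeys] at hz ⊢
      rw [hstep]
      split_ifs with hzx
      · simp
      · have hz' : z ∈ P.keys := by
          rcases List.mem_append.1 hz with h | h
          · exact h
          · simp at h; exact absurd h hzx
        exact List.mem_append.2 (Or.inl (hG.2.1 z hz'))
    · intro y
      obtain ⟨n, hn⟩ := hG.2.2 y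
      obtain ⟨m, hm, _⟩ := main n y hn
      exact ⟨m, hm⟩
  refine ⟨hkeys, hGood, fun y => ?_⟩
  obtain ⟨n, hn⟩ := hG.2.2 y
  obtain ⟨m, hm1, hm2⟩ := main n y hn
  rw [← rootF_eq_proot hGood hm1, hm2]

lemma pvAdd_mem {P : PySem.Dict Int Int} {x : Int} (hx : x ∈ P.keys) :
    pvAdd P x = P := by
  simp [pvAdd, (PySem.Dict.contains_iff_mem_keys P x).2 hx]

lemma pvFind_spec {P : PySem.Dict Int Int} (hG : Good P) :
    ∀ (fuel : Nat) (x : Int), (∃ n < fuel, IsRoot P (rootF n P x)) →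
      (pvFind fuel P x).2 = proot P x ∧ (pvFind fuel P x).1.keys = P.keys ∧
        Good (pvFind fuel P x).1 ∧ ∀ y, proot (pvFind fuel P x).1 y = proot P y := by
  intro fuel
  induction fuel with
  | zero =>
    rintro x ⟨n, hn, _⟩
    omega
  | succ fuel ih =>
    rintro x ⟨n, hlt, hn⟩
    by_cases hpx : P.getD x x = x
    · have hres : pvFind (fuel + 1) P x = (P, x) := by
        simp [pvFind, hpx]
      rw [hres]
      exact ⟨(proot_of_isRoot hpx).symm, rfl, hG, fun _ => rfl⟩
    · have hn0 : n ≠ 0 := by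
        intro he; subst he
        exact hpx (by simpa [rootF] using hn)
      have hn' : IsRoot P (rootF (n - 1) P (P.getD x x)) := by
        have : rootF n P x = rootF (n - 1) P (P.getD x x) := by
          have he : n = (n - 1) + 1 := by omega
          rw [he]; simp [rootF, hpx]
        rwa [this] at hn
      obtain ⟨h1, h2, h3, h4⟩ := ih (P.getD x x) ⟨n - 1, by omega, hn'⟩
      have hres : pvFind (fuel + 1) P x =
          ((pvFind fuel P (P.getD x x)).1.insert x (pvFind fuel P (P.getD x x)).2,
           (pvFind fuel P (P.getD x x)).2) := by
        simp [pvFind, hpx]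
      set F := pvFind fuel P (P.getD x x) with hF
      have hx : x ∈ P.keys := mem_of_step_ne hpx
      have hr : F.2 = proot P x := by rw [h1, proot_step hG hpx]
      have hrootF1 : IsRoot F.1 F.2 := by
        rw [h1, ← h4]
        exact proot_isRoot h3 _
      have hpk : P.getD x x ∈ P.keys := hG.2.1 x hx
      have hrm : F.2 ∈ F.1.keys := by
        rw [h1, h2]
        exact proot_mem hG hpk
      have hne : x ≠ F.2 := by
        intro he
        have : IsRoot P F.2 := by rw [hr]; exact proot_isRoot hG x
        exact hpx (he ▸ this)
      have hins := insert_root_spec h3 (h2.symm ▸ hx) hrootF1 hrm hne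
        (Or.inr (by rw [hr, h4]))
      rw [hres]
      refine ⟨hr, hins.1.trans h2, hins.2.1, fun y => ?_⟩
      rw [hins.2.2 y, h4, h4]
      split_ifs with hc
      · rw [hr]; exact hc.symm
      · rfl

lemma pvFind_size_spec {P : PySem.Dict Int Int} (hG : Good P) (x : Int) :
    (pvFind (P.size + 1) P x).2 = proot P x ∧ (pvFind (P.size + 1) P x).1.keys = P.keys ∧
      Good (pvFind (P.size + 1) P x).1 ∧ ∀ y, proot (pvFind (P.size + 1) P x).1 y = proot P y :=
  pvFind_spec hG _ x ⟨P.size, Nat.lt_succ_self _, rootF_size_isRoot hG x⟩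

lemma pvUnion_spec {P : PySem.Dict Int Int} (hG : Good P) {a b : Int}
    (ha : a ∈ P.keys) (hb : b ∈ P.keys) :
    (pvUnion P a b).keys = P.keys ∧ Good (pvUnion P a b) ∧
      ∀ y, proot (pvUnion P a b) y =
        if proot P y = proot P b then proot P a else proot P y := by
  obtain ⟨e1, k1, g1, p1⟩ := pvFind_size_spec hG a
  set F1 := pvFind (P.size + 1) P a with hF1
  obtain ⟨e2, k2, g2, p2⟩ := pvFind_size_spec g1 b
  set F2 := pvFind (F1.1.size + 1) F1.1 b with hF2
  have e2' : F2.2 = proot P b := by rw [e2, p1]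
  have k2' : F2.1.keys = P.keys := k2.trans k1
  have p2' : ∀ y, proot F2.1 y = proot P y := fun y => (p2 y).trans (p1 y)
  have hres : pvUnion P a b =
      (if F1.2 ≠ F2.2 then F2.1.insert F2.2 F1.2 else F2.1) := rfl
  by_cases hrr : F1.2 = F2.2
  · rw [hres, if_neg (by simpa using hrr)]
    refine ⟨k2', g2, fun y => ?_⟩
    rw [p2' y]
    split_ifs with hc
    · rw [hc, ← e2', ← hrr, e1]
    · rfl
  · rw [hres, if_pos (by simpa using hrr)]
    have hx2 : F2.2 ∈ F2.1.keys := by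
      rw [e2', k2']
      exact proot_mem hG hb
    have hroot1 : IsRoot F2.1 F1.2 := by
      have : F1.2 = proot F2.1 a := by rw [p2' a, e1]
      rw [this]
      exact proot_isRoot g2 a
    have hrm : F1.2 ∈ F2.1.keys := by
      rw [e1, k2']
      exact proot_mem hG ha
    have hroot2 : IsRoot P F2.2 := by rw [e2']; exact proot_isRoot hG b
    have hcase : proot F2.1 F2.2 = F2.2 := by
      rw [p2' F2.2]
      exact proot_of_isRoot hroot2
    have hins := insert_root_spec g2 hx2 hroot1 hrm (Ne.symm (by simpa using hrr))
      (Or.inl hcase)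
    refine ⟨hins.1.trans k2', hins.2.1, fun y => ?_⟩
    rw [hins.2.2 y, hcase, p2' y, e2', e1]

/-! ### The coupling between the two programs -/

def Lab (s : BState) (x : Int) : Int := s.label.getD x 0

def GoodB (s : BState) : Prop :=
  s.label.keys = s.order ∧ (∀ x ∈ s.order, Lab s x < s.nextId) ∧
    (∀ x ∈ s.order, ∀ y, (y ∈ s.members.getD (Lab s x) [] ↔ y ∈ s.order ∧ Lab s y = Lab s x))

/-- the coupling invariant: same key set in the same order, and the two
partitions (by root on the A side, by label on the B side) have the same kernel. -/
def RelAB (P : PySem.Dict Int Int) (s : BState) : Prop :=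
  P.keys = s.order ∧ Good P ∧ GoodB s ∧
    ∀ x ∈ s.order, ∀ y ∈ s.order, (proot P x = proot P y ↔ Lab s x = Lab s y)

lemma relAB_congr {P Q : PySem.Dict Int Int} {s : BState} (h : RelAB P s)
    (hk : Q.keys = P.keys) (hG : Good Q) (hr : ∀ y, proot Q y = proot P y) :
    RelAB Q s := by
  obtain ⟨h1, _, h3, h4⟩ := h
  exact ⟨hk.trans h1, hG, h3, fun x hx y hy => by rw [hr, hr]; exact h4 x hx y hy⟩

lemma getD_foldl_insert_const (l : List Int) (L : PySem.Dict Int Int) (a z : Int) :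
    (l.foldl (fun L y => L.insert y a) L).getD z 0 =
      if z ∈ l then a else L.getD z 0 := by
  induction l generalizing L with
  | nil => simp
  | cons c t ih =>
    simp only [List.foldl_cons, ih, PySem.Dict.getD_insert]
    by_cases hzt : z ∈ t
    · simp [hzt]
    · by_cases hzc : z = c
      · simp [hzt, hzc]
      · simp [hzt, hzc]

lemma keys_foldl_insert_const (l : List Int) (L : PySem.Dict Int Int) (a : Int)
    (h : ∀ y ∈ l, y ∈ L.keys) :
    (l.foldl (fun L y => L.insert y a) L).keys = L.keys := by
  induction l generalizing L with
  | nil => rfl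
  | cons c t ih =>
    have hck : (L.insert c a).keys = L.keys :=
      PySem.Dict.keys_insert_of_contains L a
        ((PySem.Dict.contains_iff_mem_keys L c).2 (h c (by simp)))
    simp only [List.foldl_cons]
    rw [ih (L.insert c a) (fun y hy => by rw [hck]; exact h y (by simp [hy])), hck]

lemma bAddNew_coupling {P : PySem.Dict Int Int} {s : BState} (h : RelAB P s) (x : Int) :
    RelAB (pvAdd P x) (bAddNew s x) ∧
      (∀ y, proot (pvAdd P x) y = proot P y) ∧ x ∈ (bAddNew s x).order ∧
      (∀ z ∈ s.order, z ∈ (bAddNew s x).order) := by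
  obtain ⟨hko, hGP, hGB, hker⟩ := h
  by_cases hx : x ∈ s.order
  · have hcA : pvAdd P x = P := pvAdd_mem (hko ▸ hx)
    have hcB : bAddNew s x = s := by
      simp [bAddNew, (PySem.Dict.contains_iff_mem_keys s.label x).2 (hGB.1 ▸ hx)]
    rw [hcA, hcB]
    exact ⟨⟨hko, hGP, hGB, hker⟩, fun _ => rfl, hx, fun z hz => hz⟩
  · have hcP : P.contains x = false := by
      rw [PySem.Dict.contains_eq_decide_mem_keys, hko]; simpa using hx
    have hcL : s.label.contains x = false := by
      rw [PySem.Dict.contains_eq_decide_mem_keys, hGB.1]; simpa using hx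
    have hcA : pvAdd P x = P.insert x x := by simp [pvAdd, hcP]
    obtain ⟨hk', hG', hp'⟩ := add_spec hGP (by rw [hko]; exact hx)
    have horder : (bAddNew s x).order = s.order ++ [x] := by simp [bAddNew, hcL]
    have hlabel : (bAddNew s x).label = s.label.insert x s.nextId := by
      simp [bAddNew, hcL]
    have hmems : (bAddNew s x).members = s.members.insert s.nextId [x] := by
      simp [bAddNew, hcL]
    have hnid : (bAddNew s x).nextId = s.nextId + 1 := by simp [bAddNew, hcL]
    have hlab : ∀ z, Lab (bAddNew s x) z = if z = x then s.nextId else Lab s z := by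
      intro z
      show (bAddNew s x).label.getD z 0 = _
      rw [hlabel, PySem.Dict.getD_insert]
      rfl
    have hGB' : GoodB (bAddNew s x) := by
      refine ⟨?_, ?_, ?_⟩
      · rw [hlabel, horder,
          PySem.Dict.keys_insert_of_not_contains s.label s.nextId hcL, hGB.1]
      · intro z hz
        rw [horder] at hz
        rw [hnid, hlab]
        rcases List.mem_append.1 hz with hz | hz
        · have hzx : z ≠ x := fun he => hx (he ▸ hz)
          rw [if_neg hzx]
          have := hGB.2.1 z hz; omega
        · simp only [List.mem_singleton] at hz
          subst z; simp
      · intro z hz y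
        rw [horder] at hz
        rcases List.mem_append.1 hz with hz | hz
        · have hzx : z ≠ x := fun he => hx (he ▸ hz)
          rw [hlab z, if_neg hzx]
          have hlt := hGB.2.1 z hz
          have hmm : (bAddNew s x).members.getD (Lab s z) [] =
              s.members.getD (Lab s z) [] := by
            rw [hmems, PySem.Dict.getD_insert, if_neg (by omega)]
          rw [hmm]
          constructor
          · intro hy
            have hmem := (hGB.2.2 z hz y).1 hy
            refine ⟨by rw [horder]; exact List.mem_append.2 (Or.inl hmem.1), ?_⟩
            have hyx : y ≠ x := fun he => hx (he ▸ hmem.1)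
            rw [hlab y, if_neg hyx, hmem.2]
          · rintro ⟨hy1, hy2⟩
            rw [horder] at hy1
            rcases List.mem_append.1 hy1 with hy1 | hy1
            · refine (hGB.2.2 z hz y).2 ⟨hy1, ?_⟩
              have hyx : y ≠ x := fun he => hx (he ▸ hy1)
              rwa [hlab y, if_neg hyx] at hy2
            · simp only [List.mem_singleton] at hy1
              subst hy1
              rw [hlab y, if_pos rfl] at hy2
              omega
        · simp only [List.mem_singleton] at hz
          rw [hz, hlab x, if_pos rfl]
          have hmm : (bAddNew s x).members.getD s.nextId [] = [x] := by
            rw [hmems, PySem.Dict.getD_insert, if_pos rfl]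
          rw [hmm]
          constructor
          · intro hy
            simp only [List.mem_singleton] at hy
            rw [hy]
            exact ⟨by rw [horder]; simp, by rw [hlab x, if_pos rfl]⟩
          · rintro ⟨hy1, hy2⟩
            rw [horder] at hy1
            rcases List.mem_append.1 hy1 with hy1 | hy1
            · have hyx : y ≠ x := fun he => hx (he ▸ hy1)
              rw [hlab y, if_neg hyx] at hy2
              have := hGB.2.1 y hy1; omega
            · simpa using hy1
    have hrnex : ∀ z ∈ s.order, proot P z ≠ proot P x := by
      intro z hz he
      have h1 : proot P x = x := proot_not_mem (by rw [hko]; exact hx)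
      have h2 : proot P z ∈ P.keys := proot_mem hGP (hko ▸ hz)
      rw [h1] at he
      exact hx (hko ▸ (he ▸ h2))
    have hker' : ∀ x1 ∈ (bAddNew s x).order, ∀ y1 ∈ (bAddNew s x).order,
        (proot (pvAdd P x) x1 = proot (pvAdd P x) y1 ↔
          Lab (bAddNew s x) x1 = Lab (bAddNew s x) y1) := by
      intro x1 hx1 y1 hy1
      rw [horder] at hx1 hy1
      rw [hcA, hp' x1, hp' y1, hlab x1, hlab y1]
      rcases List.mem_append.1 hx1 with hx1 | hx1 <;>
        rcases List.mem_append.1 hy1 with hy1 | hy1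
      · have hx1x : x1 ≠ x := fun he => hx (he ▸ hx1)
        have hy1x : y1 ≠ x := fun he => hx (he ▸ hy1)
        rw [if_neg hx1x, if_neg hy1x]
        exact hker x1 hx1 y1 hy1
      · simp only [List.mem_singleton] at hy1
        rw [hy1]
        have hx1x : x1 ≠ x := fun he => hx (he ▸ hx1)
        rw [if_neg hx1x, if_pos rfl]
        have h2 : Lab s x1 ≠ s.nextId := by have := hGB.2.1 x1 hx1; omega
        simp [hrnex x1 hx1, h2]
      · simp only [List.mem_singleton] at hx1
        rw [hx1]
        have hy1x : y1 ≠ x := fun he => hx (he ▸ hy1)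
        rw [if_pos rfl, if_neg hy1x]
        have h2 : s.nextId ≠ Lab s y1 := by have := hGB.2.1 y1 hy1; omega
        have h1 : proot P x ≠ proot P y1 := fun he => hrnex y1 hy1 he.symm
        simp [h1, h2]
      · simp only [List.mem_singleton] at hx1 hy1
        rw [hx1, hy1]; simp
    refine ⟨⟨?_, hcA ▸ hG', hGB', hker'⟩, fun y => by rw [hcA]; exact hp' y,
      by rw [horder]; simp, fun z hz => by rw [horder]; exact List.mem_append.2 (Or.inl hz)⟩
    rw [hcA, hk', hko, horder]

lemma bMerge_coupling {P : PySem.Dict Int Int} {s : BState} (h : RelAB P s)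
    {u v x : Int} (hu : u ∈ s.order) (hv : v ∈ s.order) (hx : x ∈ s.order)
    (huv : proot P u = proot P v) :
    RelAB (pvUnion P u x) (bMerge s v x) ∧ (bMerge s v x).order = s.order ∧
      ∀ y, proot (pvUnion P u x) y =
        if proot P y = proot P x then proot P u else proot P y := by
  obtain ⟨hko, hGP, hGB, hker⟩ := h
  have hu' : u ∈ P.keys := hko ▸ hu
  have hv' : v ∈ P.keys := hko ▸ hv
  have hx' : x ∈ P.keys := hko ▸ hx
  obtain ⟨hUk, hUg, hUf⟩ := pvUnion_spec hGP hu' hx'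
  by_cases hab : Lab s v = Lab s x
  · have hBeq : bMerge s v x = s := by
      simp only [bMerge]
      rw [if_neg]
      simp only [ne_eq, not_not]
      exact hab
    have hpux : proot P u = proot P x := huv.trans ((hker v hv x hx).2 hab)
    have hid : ∀ z, (if proot P z = proot P x then proot P u else proot P z) =
        proot P z := by
      intro z
      split_ifs with hc
      · rw [hpux, hc]
      · rfl
    rw [hBeq]
    refine ⟨⟨hUk.trans hko, hUg, hGB, fun x1 hx1 y1 hy1 => ?_⟩, rfl, hUf⟩
    rw [hUf x1, hUf y1, hid, hid]
    exact hker x1 hx1 y1 hy1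
  · have hab' : ¬ (s.label.getD v 0 = s.label.getD x 0) := hab
    have hpux : proot P u ≠ proot P x := fun he =>
      hab ((hker v hv x hx).1 (huv.symm.trans he))
    set a := Lab s v with ha
    set b := Lab s x with hb
    set q := (if (s.members.getD a []).length < (s.members.getD b []).length
        then (b, a) else (a, b)) with hq
    have habs : (q.1 = a ∧ q.2 = b) ∨ (q.1 = b ∧ q.2 = a) := by
      rw [hq]; split_ifs <;> simp
    have hq1ab : q.1 = a ∨ q.1 = b := by
      rcases habs with ⟨h1, _⟩ | ⟨h1, _⟩
      · exact Or.inl h1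
      · exact Or.inr h1
    have hq2ab : q.2 = a ∨ q.2 = b := by
      rcases habs with ⟨_, h2⟩ | ⟨_, h2⟩
      · exact Or.inr h2
      · exact Or.inl h2
    have hlabel' : (bMerge s v x).label =
        (s.members.getD q.2 []).foldl (fun L y => L.insert y q.1) s.label := by
      simp only [bMerge]
      rw [if_pos hab']
      rfl
    have hmems' : (bMerge s v x).members =
        s.members.insert q.1 (s.members.getD q.1 [] ++ s.members.getD q.2 []) := by
      simp only [bMerge]
      rw [if_pos hab']
      rfl
    have horder : (bMerge s v x).order = s.order := by
      simp only [bMerge]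
      split_ifs <;> rfl
    have hnid : (bMerge s v x).nextId = s.nextId := by
      simp only [bMerge]
      split_ifs <;> rfl
    have hiff : ∀ c, c = a ∨ c = b → ∀ y,
        (y ∈ s.members.getD c [] ↔ y ∈ s.order ∧ Lab s y = c) := by
      rintro c (rfl | rfl) y
      · exact hGB.2.2 v hv y
      · exact hGB.2.2 x hx y
    have hiff1 := hiff q.1 hq1ab
    have hiff2 := hiff q.2 hq2ab
    have hlab'' : ∀ y, Lab (bMerge s v x) y =
        (if y ∈ s.order ∧ (Lab s y = a ∨ Lab s y = b) then q.1 else Lab s y) := by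
      intro y
      show (bMerge s v x).label.getD y 0 = _
      rw [hlabel', getD_foldl_insert_const]
      by_cases hym : y ∈ s.members.getD q.2 []
      · rw [if_pos hym]
        have hy2 := (hiff2 y).1 hym
        have hcnd : y ∈ s.order ∧ (Lab s y = a ∨ Lab s y = b) := ⟨hy2.1, by
          rcases hq2ab with h2 | h2
          · exact Or.inl (hy2.2.trans h2)
          · exact Or.inr (hy2.2.trans h2)⟩
        rw [if_pos hcnd]
      · rw [if_neg hym]
        by_cases hcond : y ∈ s.order ∧ (Lab s y = a ∨ Lab s y = b)
        · rw [if_pos hcond]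
          have hne2 : Lab s y ≠ q.2 := fun he => hym ((hiff2 y).2 ⟨hcond.1, he⟩)
          rcases habs with ⟨h1, h2⟩ | ⟨h1, h2⟩
          · rcases hcond.2 with hc | hc
            · exact hc.trans h1.symm
            · exact absurd (hc.trans h2.symm) hne2
          · rcases hcond.2 with hc | hc
            · exact absurd (hc.trans h2.symm) hne2
            · exact hc.trans h1.symm
        · rw [if_neg hcond]
          rfl
    have hq1lt : q.1 < s.nextId := by
      rcases hq1ab with h1 | h1
      · rw [h1, ha]; exact hGB.2.1 v hv
      · rw [h1, hb]; exact hGB.2.1 x hx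
    have hGB' : GoodB (bMerge s v x) := by
      refine ⟨?_, ?_, ?_⟩
      · rw [hlabel', horder,
          keys_foldl_insert_const _ _ _ (fun y hy => by
            rw [hGB.1]; exact ((hiff2 y).1 hy).1), hGB.1]
      · intro z hz
        rw [horder] at hz
        rw [hnid, hlab'' z]
        split_ifs with hc
        · exact hq1lt
        · exact hGB.2.1 z hz
      · intro z hz y
        rw [horder] at hz
        rw [hmems']
        by_cases hcz : Lab s z = a ∨ Lab s z = b
        · have hlz : Lab (bMerge s v x) z = q.1 := by
            have hcc : z ∈ s.order ∧ (Lab s z = a ∨ Lab s z = b) := ⟨hz, hcz⟩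
            rw [hlab'' z, if_pos hcc]
          rw [hlz, PySem.Dict.getD_insert, if_pos rfl]
          constructor
          · intro hy
            rcases List.mem_append.1 hy with hy | hy
            · have h1 := (hiff1 y).1 hy
              refine ⟨by rw [horder]; exact h1.1, ?_⟩
              have hcc : y ∈ s.order ∧ (Lab s y = a ∨ Lab s y = b) := ⟨h1.1, by
                rcases hq1ab with hh | hh
                · exact Or.inl (h1.2.trans hh)
                · exact Or.inr (h1.2.trans hh)⟩
              rw [hlab'' y, if_pos hcc]
            · have h1 := (hiff2 y).1 hy
              refine ⟨by rw [horder]; exact h1.1, ?_⟩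
              have hcc : y ∈ s.order ∧ (Lab s y = a ∨ Lab s y = b) := ⟨h1.1, by
                rcases hq2ab with hh | hh
                · exact Or.inl (h1.2.trans hh)
                · exact Or.inr (h1.2.trans hh)⟩
              rw [hlab'' y, if_pos hcc]
          · rintro ⟨hy1, hy2⟩
            rw [horder] at hy1
            rw [hlab'' y] at hy2
            by_cases hyc : y ∈ s.order ∧ (Lab s y = a ∨ Lab s y = b)
            · -- y is in one of the two merged classes
              have hy12 : Lab s y = q.1 ∨ Lab s y = q.2 := by
                rcases habs with ⟨h1, h2⟩ | ⟨h1, h2⟩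
                · rcases hyc.2 with hc | hc
                  · exact Or.inl (hc.trans h1.symm)
                  · exact Or.inr (hc.trans h2.symm)
                · rcases hyc.2 with hc | hc
                  · exact Or.inr (hc.trans h2.symm)
                  · exact Or.inl (hc.trans h1.symm)
              rcases hy12 with hc | hc
              · exact List.mem_append.2 (Or.inl ((hiff1 y).2 ⟨hy1, hc⟩))
              · exact List.mem_append.2 (Or.inr ((hiff2 y).2 ⟨hy1, hc⟩))
            · rw [if_neg hyc] at hy2
              refine absurd ⟨hy1, ?_⟩ hyc
              rcases hq1ab with hh | hh
              · exact Or.inl (hy2.trans hh)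
              · exact Or.inr (hy2.trans hh)
        · have hlz : Lab (bMerge s v x) z = Lab s z := by
            have hcc : ¬(z ∈ s.order ∧ (Lab s z = a ∨ Lab s z = b)) := fun hc => hcz hc.2
            rw [hlab'' z, if_neg hcc]
          have hzq1 : Lab s z ≠ q.1 := by
            rcases hq1ab with hh | hh
            · rw [hh]; exact fun hc => hcz (Or.inl hc)
            · rw [hh]; exact fun hc => hcz (Or.inr hc)
          rw [hlz, PySem.Dict.getD_insert, if_neg hzq1]
          constructor
          · intro hy
            have h1 := (hGB.2.2 z hz y).1 hy
            refine ⟨by rw [horder]; exact h1.1, ?_⟩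
            have hyc : ¬(y ∈ s.order ∧ (Lab s y = a ∨ Lab s y = b)) := by
              rintro ⟨_, hc⟩
              rw [h1.2] at hc
              exact hcz hc
            rw [hlab'' y, if_neg hyc, h1.2]
          · rintro ⟨hy1, hy2⟩
            rw [horder] at hy1
            rw [hlab'' y] at hy2
            by_cases hyc : y ∈ s.order ∧ (Lab s y = a ∨ Lab s y = b)
            · rw [if_pos hyc] at hy2
              exact absurd hy2.symm hzq1
            · rw [if_neg hyc] at hy2
              exact (hGB.2.2 z hz y).2 ⟨hy1, hy2⟩
    have hA : ∀ z ∈ s.order,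
        ((Lab s z = a ∨ Lab s z = b) ↔ (proot P z = proot P u ∨ proot P z = proot P x)) := by
      intro z hz
      constructor
      · rintro (hc | hc)
        · exact Or.inl (((hker z hz v hv).2 hc).trans huv.symm)
        · exact Or.inr ((hker z hz x hx).2 hc)
      · rintro (hc | hc)
        · exact Or.inl ((hker z hz v hv).1 (hc.trans huv))
        · exact Or.inr ((hker z hz x hx).1 hc)
    have hAv : ∀ z, (proot P z = proot P u ∨ proot P z = proot P x) →
        (if proot P z = proot P x then proot P u else proot P z) = proot P u := by
      rintro z (hc | hc)
      · rw [if_neg (by rw [hc]; exact hpux), hc]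
      · rw [if_pos hc]
    have hAn : ∀ z, ¬ (proot P z = proot P u ∨ proot P z = proot P x) →
        (if proot P z = proot P x then proot P u else proot P z) = proot P z := by
      intro z hc
      rw [if_neg (fun hh => hc (Or.inr hh))]
    have hker' : ∀ x1 ∈ (bMerge s v x).order, ∀ y1 ∈ (bMerge s v x).order,
        (proot (pvUnion P u x) x1 = proot (pvUnion P u x) y1 ↔
          Lab (bMerge s v x) x1 = Lab (bMerge s v x) y1) := by
      intro x1 hx1 y1 hy1
      rw [horder] at hx1 hy1
      rw [hUf x1, hUf y1, hlab'' x1, hlab'' y1]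
      by_cases hc1 : Lab s x1 = a ∨ Lab s x1 = b <;>
        by_cases hc2 : Lab s y1 = a ∨ Lab s y1 = b
      · have hp1 : x1 ∈ s.order ∧ (Lab s x1 = a ∨ Lab s x1 = b) := ⟨hx1, hc1⟩
        have hp2 : y1 ∈ s.order ∧ (Lab s y1 = a ∨ Lab s y1 = b) := ⟨hy1, hc2⟩
        rw [if_pos hp1, if_pos hp2,
          hAv x1 ((hA x1 hx1).1 hc1), hAv y1 ((hA y1 hy1).1 hc2)]
        simp
      · have hp1 : x1 ∈ s.order ∧ (Lab s x1 = a ∨ Lab s x1 = b) := ⟨hx1, hc1⟩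
        have hp2 : ¬(y1 ∈ s.order ∧ (Lab s y1 = a ∨ Lab s y1 = b)) := fun hh => hc2 hh.2
        have hr2 : ¬(proot P y1 = proot P u ∨ proot P y1 = proot P x) :=
          fun hh => hc2 ((hA y1 hy1).2 hh)
        rw [if_pos hp1, if_neg hp2, hAv x1 ((hA x1 hx1).1 hc1), hAn y1 hr2]
        constructor
        · intro hh
          exact absurd (Or.inl hh.symm) hr2
        · intro hh
          refine absurd ?_ hc2
          rcases hq1ab with hq | hq
          · exact Or.inl (hh.symm.trans hq)
          · exact Or.inr (hh.symm.trans hq)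
      · have hp1 : ¬(x1 ∈ s.order ∧ (Lab s x1 = a ∨ Lab s x1 = b)) := fun hh => hc1 hh.2
        have hp2 : y1 ∈ s.order ∧ (Lab s y1 = a ∨ Lab s y1 = b) := ⟨hy1, hc2⟩
        have hr1 : ¬(proot P x1 = proot P u ∨ proot P x1 = proot P x) :=
          fun hh => hc1 ((hA x1 hx1).2 hh)
        rw [if_neg hp1, if_pos hp2, hAn x1 hr1, hAv y1 ((hA y1 hy1).1 hc2)]
        constructor
        · intro hh
          exact absurd (Or.inl hh) hr1
        · intro hh
          refine absurd ?_ hc1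
          rcases hq1ab with hq | hq
          · exact Or.inl (hh.trans hq)
          · exact Or.inr (hh.trans hq)
      · have hp1 : ¬(x1 ∈ s.order ∧ (Lab s x1 = a ∨ Lab s x1 = b)) := fun hh => hc1 hh.2
        have hp2 : ¬(y1 ∈ s.order ∧ (Lab s y1 = a ∨ Lab s y1 = b)) := fun hh => hc2 hh.2
        have hr1 : ¬(proot P x1 = proot P u ∨ proot P x1 = proot P x) :=
          fun hh => hc1 ((hA x1 hx1).2 hh)
        have hr2 : ¬(proot P y1 = proot P u ∨ proot P y1 = proot P x) :=
          fun hh => hc2 ((hA y1 hy1).2 hh)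
        rw [if_neg hp1, if_neg hp2, hAn x1 hr1, hAn y1 hr2]
        exact hker x1 hx1 y1 hy1
    exact ⟨⟨by rw [hUk, hko, horder], hUg, hGB', hker'⟩, horder, hUf⟩

/-! ### group processing -/

def pairOp (P : PySem.Dict Int Int) (a b : Int) : PySem.Dict Int Int :=
  pvUnion (pvAdd (pvAdd P a) b) a b

lemma pairOp_noop {P : PySem.Dict Int Int} (hG : Good P) {u v : Int}
    (hu : u ∈ P.keys) (hv : v ∈ P.keys) (huv : proot P u = proot P v) :
    (pairOp P u v).keys = P.keys ∧ Good (pairOp P u v) ∧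
      ∀ y, proot (pairOp P u v) y = proot P y := by
  have h1 := pvAdd_mem hu
  have h2 := pvAdd_mem hv
  have h := pvUnion_spec hG hu hv
  unfold pairOp
  rw [h1, h2]
  refine ⟨h.1, h.2.1, fun y => ?_⟩
  rw [h.2.2 y]
  split_ifs with hc
  · rw [hc, huv]
  · rfl

def bStep (t : BState × Option Int) (x : Int) : BState × Option Int :=
  let s1 := bAddNew t.1 x
  let s2 := match t.2 with
    | some p => bMerge s1 p x
    | none => s1
  (s2, some x)

lemma pvAdd_idem (P : PySem.Dict Int Int) (x : Int) :
    pvAdd (pvAdd P x) x = pvAdd P x := by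
  by_cases hc : P.contains x = true
  · have h1 : pvAdd P x = P := by simp [pvAdd, hc]
    rw [h1]
    exact h1
  · have h1 : pvAdd P x = P.insert x x := by simp [pvAdd, hc]
    rw [h1]
    simp [pvAdd, PySem.Dict.contains_insert_self]

/-- row 0 of A's double loop, coupled with B's walk along the group. -/
lemma row0_coupling :
    ∀ (rest : List Int) (P : PySem.Dict Int Int) (s : BState) (u p : Int),
      RelAB P s → u ∈ s.order → p ∈ s.order → proot P p = proot P u →
      RelAB (rest.foldl (fun Q c => pairOp Q u c) P) (rest.foldl bStep (s, some p)).1 ∧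
      (∀ z ∈ s.order, z ∈ (rest.foldl bStep (s, some p)).1.order) ∧
      (∀ z ∈ rest, z ∈ (rest.foldl bStep (s, some p)).1.order ∧
        proot (rest.foldl (fun Q c => pairOp Q u c) P) z =
          proot (rest.foldl (fun Q c => pairOp Q u c) P) u) ∧
      (∀ y, proot P y = proot P u →
        proot (rest.foldl (fun Q c => pairOp Q u c) P) y =
          proot (rest.foldl (fun Q c => pairOp Q u c) P) u) := by
  intro rest
  induction rest with
  | nil =>
    intro P s u p hRel hu hp hpu
    exact ⟨hRel, fun z hz => hz, fun z hz => by simp at hz, fun y hy => hy⟩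
  | cons c t ih =>
    intro P s u p hRel hu hp hpu
    have hu' : u ∈ P.keys := by rw [hRel.1]; exact hu
    obtain ⟨hRel1, hpres1, hcin1, hmono1⟩ := bAddNew_coupling hRel c
    have hu1 : u ∈ (bAddNew s c).order := hmono1 u hu
    have hp1 : p ∈ (bAddNew s c).order := hmono1 p hp
    have hpu1 : proot (pvAdd P c) u = proot (pvAdd P c) p := by
      rw [hpres1 p, hpres1 u]; exact hpu.symm
    obtain ⟨hRel2, hord2, hform2⟩ := bMerge_coupling hRel1 hu1 hp1 hcin1 hpu1
    have hu2 : u ∈ (bMerge (bAddNew s c) p c).order := by rw [hord2]; exact hu1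
    have hc2 : c ∈ (bMerge (bAddNew s c) p c).order := by rw [hord2]; exact hcin1
    have hPu3 : proot (pvUnion (pvAdd P c) u c) u = proot (pvAdd P c) u := by
      rw [hform2 u]; split_ifs <;> rfl
    have hcu3 : proot (pvUnion (pvAdd P c) u c) c = proot (pvUnion (pvAdd P c) u c) u := by
      rw [hform2 c, if_pos rfl, hPu3]
    have hstep_conn : ∀ y, proot P y = proot P u →
        proot (pvUnion (pvAdd P c) u c) y = proot (pvUnion (pvAdd P c) u c) u := by
      intro y hy
      have hy2 : proot (pvAdd P c) y = proot (pvAdd P c) u := by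
        rw [hpres1 y, hpres1 u]; exact hy
      rw [hform2 y, hPu3]
      split_ifs with hcnd
      · rfl
      · exact hy2
    obtain ⟨ihRel, ihmono, ihconn, ihpres⟩ := ih (pvUnion (pvAdd P c) u c)
      (bMerge (bAddNew s c) p c) u c hRel2 hu2 hc2 hcu3
    have hAfold : (c :: t).foldl (fun Q z => pairOp Q u z) P =
        t.foldl (fun Q z => pairOp Q u z) (pvUnion (pvAdd P c) u c) := by
      simp only [List.foldl_cons]
      congr 1
      show pairOp P u c = _
      unfold pairOp
      rw [pvAdd_mem hu']
    have hBfold : (c :: t).foldl bStep (s, some p) =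
        t.foldl bStep (bMerge (bAddNew s c) p c, some c) := rfl
    rw [hAfold, hBfold]
    refine ⟨ihRel, ?_, ?_, ?_⟩
    · intro z hz
      exact ihmono z (by rw [hord2]; exact hmono1 z hz)
    · intro z hz
      rcases List.mem_cons.1 hz with rfl | hz
      · exact ⟨ihmono z hc2, ihpres z hcu3⟩
      · exact ihconn z hz
    · intro y hy
      exact ihpres y (hstep_conn y hy)

/-! ### groups and the whole first phase -/

lemma pyRange_one_nil {a b : Int} (h : b ≤ a) : PySem.List.pyRange a b = [] := by
  rw [List.eq_nil_iff_forall_not_mem]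
  intro x hx
  rw [PySem.List.mem_pyRange_one] at hx
  omega

lemma map_pyGetD_tail (g0 : Int) (rest : List Int) :
    (PySem.List.pyRange 1 (PySem.List.len (g0 :: rest))).map
      (fun j => PySem.List.pyGetD (g0 :: rest) j 0) = rest := by
  have h0 : (0:Int) < PySem.List.len (g0 :: rest) := by
    rw [PySem.List.len_eq, List.length_cons]
    omega
  have hmap := PySem.List.map_pyGetD_pyRange_zero (g0 :: rest) 0
  rw [PySem.List.pyRange_one_cons h0] at hmap
  simp only [List.map_cons, PySem.List.pyGetD_zero_cons] at hmap
  simpa using hmap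

lemma inner_noop (Pa : PySem.Dict Int Int) (g : List Int) (u0 : Int)
    (hconn : ∀ z ∈ g, z ∈ Pa.keys ∧ proot Pa z = proot Pa u0) :
    ∀ (js : List Int) (Q : PySem.Dict Int Int) (e : Int),
      Q.keys = Pa.keys → Good Q → (∀ y, proot Q y = proot Pa y) → e ∈ g →
      (∀ j ∈ js, 0 ≤ j ∧ j < (g.length : Int)) →
      (js.foldl (fun Q j => pairOp Q e (PySem.List.pyGetD g j 0)) Q).keys = Pa.keys ∧
      Good (js.foldl (fun Q j => pairOp Q e (PySem.List.pyGetD g j 0)) Q) ∧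
      (∀ y, proot (js.foldl (fun Q j => pairOp Q e (PySem.List.pyGetD g j 0)) Q) y =
        proot Pa y) := by
  intro js
  induction js with
  | nil => intro Q e h1 h2 h3 _ _; exact ⟨h1, h2, h3⟩
  | cons j t ih =>
    intro Q e h1 h2 h3 he hb
    have hjb := hb j (by simp)
    have hjr : PySem.Raise.InRange g.length j := ⟨by omega, by omega⟩
    have hme : PySem.List.pyGetD g j 0 ∈ g := PySem.List.pyGetD_mem g 0 hjr
    have hek : e ∈ Q.keys := by rw [h1]; exact (hconn e he).1
    have hjk : PySem.List.pyGetD g j 0 ∈ Q.keys := by rw [h1]; exact (hconn _ hme).1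
    have hpe : proot Q e = proot Q (PySem.List.pyGetD g j 0) := by
      rw [h3, h3, (hconn e he).2, (hconn _ hme).2]
    obtain ⟨hk, hg, hp⟩ := pairOp_noop h2 hek hjk hpe
    simp only [List.foldl_cons]
    exact ih _ e (hk.trans h1) hg (fun y => (hp y).trans (h3 y)) he
      (fun j' hj' => hb j' (by simp [hj']))

lemma outer_noop (Pa : PySem.Dict Int Int) (g : List Int) (u0 : Int)
    (hconn : ∀ z ∈ g, z ∈ Pa.keys ∧ proot Pa z = proot Pa u0) :
    ∀ (idxs : List Int) (Q : PySem.Dict Int Int),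
      Q.keys = Pa.keys → Good Q → (∀ y, proot Q y = proot Pa y) →
      (∀ i ∈ idxs, 0 ≤ i ∧ i < (g.length : Int)) →
      (idxs.foldl (fun Q i => (PySem.List.pyRange (i + 1) (PySem.List.len g)).foldl
        (fun Q j => pairOp Q (PySem.List.pyGetD g i 0) (PySem.List.pyGetD g j 0)) Q)
        Q).keys = Pa.keys ∧
      Good (idxs.foldl (fun Q i => (PySem.List.pyRange (i + 1) (PySem.List.len g)).foldl
        (fun Q j => pairOp Q (PySem.List.pyGetD g i 0) (PySem.List.pyGetD g j 0)) Q) Q) ∧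
      (∀ y, proot (idxs.foldl (fun Q i =>
        (PySem.List.pyRange (i + 1) (PySem.List.len g)).foldl
        (fun Q j => pairOp Q (PySem.List.pyGetD g i 0) (PySem.List.pyGetD g j 0)) Q) Q) y =
        proot Pa y) := by
  intro idxs
  induction idxs with
  | nil => intro Q h1 h2 h3 _; exact ⟨h1, h2, h3⟩
  | cons i t ih =>
    intro Q h1 h2 h3 hb
    have hib := hb i (by simp)
    have hir : PySem.Raise.InRange g.length i := ⟨by omega, by omega⟩
    have hie : PySem.List.pyGetD g i 0 ∈ g := PySem.List.pyGetD_mem g 0 hir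
    have hrow := inner_noop Pa g u0 hconn
      (PySem.List.pyRange (i + 1) (PySem.List.len g)) Q (PySem.List.pyGetD g i 0)
      h1 h2 h3 hie (by
        intro j hj
        rw [PySem.List.mem_pyRange_one] at hj
        rw [PySem.List.len_eq] at hj
        omega)
    simp only [List.foldl_cons]
    exact ih _ hrow.1 hrow.2.1 hrow.2.2 (fun i' hi' => hb i' (by simp [hi']))

def aGroup (P : PySem.Dict Int Int) (g : List Int) : PySem.Dict Int Int :=
  (PySem.List.pyRange 0 (PySem.List.len g - 1)).foldl (fun P i =>
    (PySem.List.pyRange (i + 1) (PySem.List.len g)).foldl (fun P j =>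
      pairOp P (PySem.List.pyGetD g i 0) (PySem.List.pyGetD g j 0)) P) P

lemma aGroup_coupling {P : PySem.Dict Int Int} {s : BState} (h : RelAB P s)
    (g : List Int) : RelAB (aGroup P g) (bGroup s g) := by
  by_cases hlen : g.length < 2
  · have hA : aGroup P g = P := by
      unfold aGroup
      rw [pyRange_one_nil (by rw [PySem.List.len_eq]; omega)]
      rfl
    have hB : bGroup s g = s := by
      unfold bGroup
      rw [if_pos hlen]
    rw [hA, hB]; exact h
  · rw [not_lt] at hlen
    obtain ⟨g0, rest, rfl⟩ : ∃ g0 rest, g = g0 :: rest := by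
      cases g with
      | nil => simp at hlen
      | cons a t => exact ⟨a, t, rfl⟩
    have hrne : rest ≠ [] := by
      intro he
      rw [he] at hlen
      simp at hlen
    have hB : bGroup s (g0 :: rest) = (rest.foldl bStep (bAddNew s g0, some g0)).1 := by
      unfold bGroup
      rw [if_neg (by omega)]
      rfl
    have hlen1 : (0:Int) < PySem.List.len (g0 :: rest) - 1 := by
      rw [PySem.List.len_eq, List.length_cons]
      have : 2 ≤ rest.length + 1 := hlen
      omega
    have hcons : PySem.List.pyRange 0 (PySem.List.len (g0 :: rest) - 1) =
        0 :: PySem.List.pyRange 1 (PySem.List.len (g0 :: rest) - 1) := by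
      have hc := PySem.List.pyRange_one_cons hlen1
      simpa using hc
    have hA1 : aGroup P (g0 :: rest) =
        (PySem.List.pyRange 1 (PySem.List.len (g0 :: rest) - 1)).foldl
          (fun Q i => (PySem.List.pyRange (i + 1) (PySem.List.len (g0 :: rest))).foldl
            (fun Q j => pairOp Q (PySem.List.pyGetD (g0 :: rest) i 0)
              (PySem.List.pyGetD (g0 :: rest) j 0)) Q)
          ((PySem.List.pyRange 1 (PySem.List.len (g0 :: rest))).foldl
            (fun Q j => pairOp Q g0 (PySem.List.pyGetD (g0 :: rest) j 0)) P) := by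
      unfold aGroup
      rw [hcons]
      simp only [List.foldl_cons, PySem.List.pyGetD_zero_cons]
      norm_num
    have hrow0 : (PySem.List.pyRange 1 (PySem.List.len (g0 :: rest))).foldl
        (fun Q j => pairOp Q g0 (PySem.List.pyGetD (g0 :: rest) j 0)) P =
        rest.foldl (fun Q z => pairOp Q g0 z) P := by
      conv_rhs => rw [← map_pyGetD_tail g0 rest]
      rw [List.foldl_map]
    have hshift : rest.foldl (fun Q z => pairOp Q g0 z) P =
        rest.foldl (fun Q z => pairOp Q g0 z) (pvAdd P g0) := by
      cases rest with
      | nil => exact absurd rfl hrne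
      | cons c t =>
        simp only [List.foldl_cons]
        congr 1
        show pairOp P g0 c = pairOp (pvAdd P g0) g0 c
        unfold pairOp
        rw [pvAdd_idem]
    obtain ⟨hRel1, hpres1, hcin1, hmono1⟩ := bAddNew_coupling h g0
    obtain ⟨hRelR, hmonoR, hconnR, hpresR⟩ := row0_coupling rest (pvAdd P g0)
      (bAddNew s g0) g0 g0 hRel1 hcin1 hcin1 rfl
    have hconnAll : ∀ z ∈ (g0 :: rest),
        z ∈ (rest.foldl (fun Q c => pairOp Q g0 c) (pvAdd P g0)).keys ∧
        proot (rest.foldl (fun Q c => pairOp Q g0 c) (pvAdd P g0)) z =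
          proot (rest.foldl (fun Q c => pairOp Q g0 c) (pvAdd P g0)) g0 := by
      intro z hz
      rcases List.mem_cons.1 hz with rfl | hz
      · exact ⟨by rw [hRelR.1]; exact hmonoR z hcin1, rfl⟩
      · obtain ⟨hm, hc⟩ := hconnR z hz
        exact ⟨by rw [hRelR.1]; exact hm, hc⟩
    obtain ⟨hok, hog, hop⟩ := outer_noop _ (g0 :: rest) g0 hconnAll
      (PySem.List.pyRange 1 (PySem.List.len (g0 :: rest) - 1)) _ rfl
      hRelR.2.1 (fun y => rfl) (by
        intro i hi
        rw [PySem.List.mem_pyRange_one] at hi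
        rw [PySem.List.len_eq, List.length_cons] at hi
        constructor
        · omega
        · rw [List.length_cons]; omega)
    rw [hB, hA1, hrow0, hshift]
    exact relAB_congr hRelR hok hog hop

lemma top_coupling : ∀ (ts : List (List Int)) (P : PySem.Dict Int Int) (s : BState),
    RelAB P s → RelAB (ts.foldl aGroup P) (ts.foldl bGroup s) := by
  intro ts
  induction ts with
  | nil => intro P s h; exact h
  | cons g t ih =>
    intro P s h
    simp only [List.foldl_cons]
    exact ih _ _ (aGroup_coupling h g)

lemma rel_init : RelAB PySem.Dict.empty ⟨PySem.Dict.empty, PySem.Dict.empty, [], 0⟩ := by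
  refine ⟨PySem.Dict.keys_empty, ⟨?_, ?_, ?_⟩, ⟨PySem.Dict.keys_empty, ?_, ?_⟩, ?_⟩
  · rw [PySem.Dict.keys_empty]; exact List.nodup_nil
  · intro x hx
    rw [PySem.Dict.keys_empty] at hx
    simp at hx
  · intro x
    refine ⟨0, ?_⟩
    show PySem.Dict.empty.getD x x = x
    rw [PySem.Dict.getD_empty]
  · intro x hx; simp at hx
  · intro x hx; simp at hx
  · intro x hx; simp at hx

/-! ### the final grouping phase -/

def aFinStep (st : PySem.Dict Int Int × PySem.Dict Int (List Int)) (image : Int) :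
    PySem.Dict Int Int × PySem.Dict Int (List Int) :=
  let f := pvFind (st.1.size + 1) st.1 image
  let G := if (st.2.get? f.2).isNone then st.2.insert f.2 ([] : List Int) else st.2
  (f.1, G.modify f.2 [] (· ++ [image]))

/-- coupling invariant for the output-building loop: the A-side dict is keyed by
roots, the B-side one by labels, with identical value lists in the same order. -/
def FinInv (P : PySem.Dict Int Int) (s : BState) (Q : PySem.Dict Int Int)
    (GA GB : PySem.Dict Int (List Int)) : Prop :=
  Q.keys = P.keys ∧ Good Q ∧ (∀ y, proot Q y = proot P y) ∧
    GA.keys.Nodup ∧ GB.keys.Nodup ∧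
    List.Forall₂ (fun ka kb => (∃ w ∈ s.order, ka = proot P w ∧ kb = Lab s w) ∧
      GA.getD ka [] = GB.getD kb []) GA.keys GB.keys

lemma forall₂_append_single {α β : Type} {R : α → β → Prop} :
    ∀ {l1 : List α} {l2 : List β}, List.Forall₂ R l1 l2 → ∀ {a : α} {b : β}, R a b →
      List.Forall₂ R (l1 ++ [a]) (l2 ++ [b]) := by
  intro l1 l2 hF
  induction hF with
  | nil => intro a b h; exact List.Forall₂.cons h List.Forall₂.nil
  | cons hhead _ ihtail => intro a b h; exact List.Forall₂.cons hhead (ihtail h)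

lemma forall₂_mem_imp {α β : Type} {R S : α → β → Prop} :
    ∀ {l1 : List α} {l2 : List β}, List.Forall₂ R l1 l2 →
      (∀ a b, a ∈ l1 → b ∈ l2 → R a b → S a b) → List.Forall₂ S l1 l2 := by
  intro l1 l2 hF
  induction hF with
  | nil => intro _; exact List.Forall₂.nil
  | cons hhead _ ihtail =>
    intro himp
    exact List.Forall₂.cons (himp _ _ (by simp) (by simp) hhead)
      (ihtail (fun a b ha hb => himp a b (by simp [ha]) (by simp [hb])))

lemma mem_corr {P : PySem.Dict Int Int} {s : BState}
    (hker : ∀ x ∈ s.order, ∀ y ∈ s.order, (proot P x = proot P y ↔ Lab s x = Lab s y))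
    {x : Int} (hx : x ∈ s.order) {GA GB : PySem.Dict Int (List Int)} :
    ∀ {ka kb : List Int},
      List.Forall₂ (fun ka kb => (∃ w ∈ s.order, ka = proot P w ∧ kb = Lab s w) ∧
        GA.getD ka [] = GB.getD kb []) ka kb →
      (proot P x ∈ ka ↔ Lab s x ∈ kb) := by
  intro ka kb hF
  induction hF with
  | nil => simp
  | cons hhead _ ihtail =>
    obtain ⟨⟨w, hw, rfl, rfl⟩, _⟩ := hhead
    simp only [List.mem_cons]
    constructor
    · rintro (he | he)
      · exact Or.inl ((hker x hx w hw).1 he)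
      · exact Or.inr (ihtail.1 he)
    · rintro (he | he)
      · exact Or.inl ((hker x hx w hw).2 he)
      · exact Or.inr (ihtail.2 he)

lemma fin_step {P : PySem.Dict Int Int} {s : BState} (h : RelAB P s)
    {x : Int} (hx : x ∈ s.order) {Q : PySem.Dict Int Int}
    {GA GB : PySem.Dict Int (List Int)} (hInv : FinInv P s Q GA GB) :
    FinInv P s (aFinStep (Q, GA) x).1 (aFinStep (Q, GA) x).2
      ((GB.setdefault (s.label.getD x 0) []).modify (s.label.getD x 0) [] (· ++ [x])) := by
  obtain ⟨hQk, hQg, hQp, hAnd, hBnd, hF⟩ := hInv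
  obtain ⟨hko, hGP, hGB, hker⟩ := h
  obtain ⟨hf2, hf1k, hf1g, hf1p⟩ := pvFind_size_spec hQg x
  have hroot : (pvFind (Q.size + 1) Q x).2 = proot P x := by rw [hf2, hQp]
  have h1 : (aFinStep (Q, GA) x).1 = (pvFind (Q.size + 1) Q x).1 := rfl
  have h2 : (aFinStep (Q, GA) x).2 =
      (if (GA.get? (proot P x)).isNone then GA.insert (proot P x) [] else GA).modify
        (proot P x) [] (· ++ [x]) := by
    show (if (GA.get? (pvFind (Q.size + 1) Q x).2).isNone
        then GA.insert (pvFind (Q.size + 1) Q x).2 ([] : List Int) else GA).modify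
        (pvFind (Q.size + 1) Q x).2 [] (· ++ [x]) = _
    rw [hroot]
  have hkk : s.label.getD x 0 = Lab s x := rfl
  have hmemiff : proot P x ∈ GA.keys ↔ Lab s x ∈ GB.keys := mem_corr hker hx hF
  refine ⟨by rw [h1, hf1k, hQk], by rw [h1]; exact hf1g,
    fun y => by rw [h1, hf1p y, hQp y], ?nA, ?nB, ?nF⟩
  -- now pure dictionary bookkeeping, split on presence of the key pair
  case nA =>
    rw [h2]
    by_cases hcr : proot P x ∈ GA.keys
    · have hne : ¬ (GA.get? (proot P x)).isNone = true := by
        rw [Option.isNone_iff_eq_none, PySem.Dict.get?_eq_none_iff_not_mem_keys]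
        exact fun hh => hh hcr
      rw [if_neg hne, PySem.Dict.keys_modify]
      rw [PySem.Dict.keys_insert_of_contains GA _
        ((PySem.Dict.contains_iff_mem_keys GA _).2 hcr)]
      exact hAnd
    · have hyes : (GA.get? (proot P x)).isNone = true := by
        rw [Option.isNone_iff_eq_none, PySem.Dict.get?_eq_none_iff_not_mem_keys]
        exact hcr
      rw [if_pos hyes, PySem.Dict.keys_modify]
      rw [PySem.Dict.keys_insert_of_contains _ _
        (PySem.Dict.contains_insert_self GA (proot P x) [])]
      exact PySem.Dict.nodup_keys_insert GA _ _ hAnd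
  case nB =>
    rw [hkk]
    by_cases hck : Lab s x ∈ GB.keys
    · rw [PySem.Dict.setdefault_of_contains GB []
        ((PySem.Dict.contains_iff_mem_keys GB _).2 hck), PySem.Dict.keys_modify]
      rw [PySem.Dict.keys_insert_of_contains GB _
        ((PySem.Dict.contains_iff_mem_keys GB _).2 hck)]
      exact hBnd
    · have hcf : GB.contains (Lab s x) = false := by
        rw [PySem.Dict.contains_eq_decide_mem_keys]
        simpa using hck
      rw [PySem.Dict.setdefault_of_not_contains GB [] hcf, PySem.Dict.keys_modify]
      rw [PySem.Dict.keys_insert_of_contains _ _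
        (PySem.Dict.contains_insert_self GB (Lab s x) [])]
      exact PySem.Dict.nodup_keys_insert GB _ _ hBnd
  case nF =>
    rw [h2, hkk]
    by_cases hcr : proot P x ∈ GA.keys
    · -- key pair already present: both modifies hit the matching entry
      have hck : Lab s x ∈ GB.keys := hmemiff.1 hcr
      have hne : ¬ (GA.get? (proot P x)).isNone = true := by
        rw [Option.isNone_iff_eq_none, PySem.Dict.get?_eq_none_iff_not_mem_keys]
        exact fun hh => hh hcr
      rw [if_neg hne, PySem.Dict.setdefault_of_contains GB []
        ((PySem.Dict.contains_iff_mem_keys GB _).2 hck)]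
      have hkeysA : (GA.modify (proot P x) [] (· ++ [x])).keys = GA.keys := by
        rw [PySem.Dict.keys_modify, PySem.Dict.keys_insert_of_contains GA _
          ((PySem.Dict.contains_iff_mem_keys GA _).2 hcr)]
      have hkeysB : (GB.modify (Lab s x) [] (· ++ [x])).keys = GB.keys := by
        rw [PySem.Dict.keys_modify, PySem.Dict.keys_insert_of_contains GB _
          ((PySem.Dict.contains_iff_mem_keys GB _).2 hck)]
      rw [hkeysA, hkeysB]
      refine forall₂_mem_imp hF ?_
      rintro ka kb _ _ ⟨⟨w, hw, rfl, rfl⟩, hval⟩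
      refine ⟨⟨w, hw, rfl, rfl⟩, ?_⟩
      rw [PySem.Dict.getD_modify, PySem.Dict.getD_modify]
      by_cases hs : proot P w = proot P x
      · rw [if_pos hs, if_pos ((hker w hw x hx).1 hs)]
        rw [← hs, ← (hker w hw x hx).1 hs, hval]
      · rw [if_neg hs, if_neg (fun hh => hs ((hker w hw x hx).2 hh))]
        exact hval
    · -- fresh key pair: both sides append a new entry
      have hck : Lab s x ∉ GB.keys := fun hh => hcr (hmemiff.2 hh)
      have hyes : (GA.get? (proot P x)).isNone = true := by
        rw [Option.isNone_iff_eq_none, PySem.Dict.get?_eq_none_iff_not_mem_keys]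
        exact hcr
      have hcfA : GA.contains (proot P x) = false := by
        rw [PySem.Dict.contains_eq_decide_mem_keys]
        simpa using hcr
      have hcfB : GB.contains (Lab s x) = false := by
        rw [PySem.Dict.contains_eq_decide_mem_keys]
        simpa using hck
      rw [if_pos hyes, PySem.Dict.setdefault_of_not_contains GB [] hcfB]
      have hkeysA : ((GA.insert (proot P x) []).modify (proot P x) [] (· ++ [x])).keys =
          GA.keys ++ [proot P x] := by
        rw [PySem.Dict.keys_modify, PySem.Dict.keys_insert_of_contains _ _
          (PySem.Dict.contains_insert_self GA (proot P x) []),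
          PySem.Dict.keys_insert_of_not_contains GA _ hcfA]
      have hkeysB : ((GB.insert (Lab s x) []).modify (Lab s x) [] (· ++ [x])).keys =
          GB.keys ++ [Lab s x] := by
        rw [PySem.Dict.keys_modify, PySem.Dict.keys_insert_of_contains _ _
          (PySem.Dict.contains_insert_self GB (Lab s x) []),
          PySem.Dict.keys_insert_of_not_contains GB _ hcfB]
      rw [hkeysA, hkeysB]
      refine forall₂_append_single ?_ ?_
      · refine forall₂_mem_imp hF ?_
        rintro ka kb hka hkb ⟨⟨w, hw, rfl, rfl⟩, hval⟩
        refine ⟨⟨w, hw, rfl, rfl⟩, ?_⟩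
        have hwx : proot P w ≠ proot P x := fun hh => hcr (hh ▸ hka)
        have hwl : Lab s w ≠ Lab s x := fun hh => hck (hh ▸ hkb)
        rw [PySem.Dict.getD_modify, PySem.Dict.getD_modify, if_neg hwx, if_neg hwl,
          PySem.Dict.getD_insert, PySem.Dict.getD_insert, if_neg hwx, if_neg hwl]
        exact hval
      · refine ⟨⟨x, hx, rfl, rfl⟩, ?_⟩
        rw [PySem.Dict.getD_modify, PySem.Dict.getD_modify, if_pos rfl, if_pos rfl,
          PySem.Dict.getD_insert, PySem.Dict.getD_insert, if_pos rfl, if_pos rfl]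

lemma fin_loop {P : PySem.Dict Int Int} {s : BState} (h : RelAB P s) :
    ∀ (l : List Int), (∀ z ∈ l, z ∈ s.order) →
    ∀ (Q : PySem.Dict Int Int) (GA GB : PySem.Dict Int (List Int)),
      FinInv P s Q GA GB →
      FinInv P s (l.foldl aFinStep (Q, GA)).1 (l.foldl aFinStep (Q, GA)).2
        (l.foldl (fun C z => (C.setdefault (s.label.getD z 0) []).modify
          (s.label.getD z 0) [] (· ++ [z])) GB) := by
  intro l
  induction l with
  | nil => intro _ Q GA GB hInv; exact hInv
  | cons c t ih =>
    intro hmem Q GA GB hInv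
    simp only [List.foldl_cons]
    exact ih (fun z hz => hmem z (by simp [hz])) _ _ _ (fin_step h (hmem c (by simp)) hInv)

lemma values_eq_of_fininv {P : PySem.Dict Int Int} {s : BState}
    {Q : PySem.Dict Int Int} {GA GB : PySem.Dict Int (List Int)}
    (hInv : FinInv P s Q GA GB) : GA.values = GB.values := by
  obtain ⟨_, _, _, hAnd, hBnd, hF⟩ := hInv
  rw [PySem.Dict.values_eq_map_keys GA hAnd ([] : List Int),
    PySem.Dict.values_eq_map_keys GB hBnd ([] : List Int)]
  have haux : ∀ (la : List Int) (lb : List Int),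
      List.Forall₂ (fun ka kb => (∃ w ∈ s.order, ka = proot P w ∧ kb = Lab s w) ∧
        GA.getD ka [] = GB.getD kb []) la lb →
      la.map (fun k => GA.getD k []) = lb.map (fun k => GB.getD k []) := by
    intro la lb hF2
    induction hF2 with
    | nil => rfl
    | cons hhead _ ihtail =>
      simp only [List.map_cons]
      rw [hhead.2, ihtail]
  exact haux _ _ hF

-- ===== VERDICT (by name: the statement is the Claim_ definition above) =====
theorem group_related_images_spec : Claim_equal_group_related_images := by
  unfold Claim_equal_group_related_images
  intro tuples _
  unfold Spec_group_related_images
  have htop := top_coupling tuples PySem.Dict.empty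
    ⟨PySem.Dict.empty, PySem.Dict.empty, [], 0⟩ rel_init
  have hInv0 : FinInv (tuples.foldl aGroup PySem.Dict.empty)
      (tuples.foldl bGroup ⟨PySem.Dict.empty, PySem.Dict.empty, [], 0⟩)
      (tuples.foldl aGroup PySem.Dict.empty) PySem.Dict.empty PySem.Dict.empty := by
    refine ⟨rfl, htop.2.1, fun y => rfl, ?_, ?_, ?_⟩
    · rw [PySem.Dict.keys_empty]; exact List.nodup_nil
    · rw [PySem.Dict.keys_empty]; exact List.nodup_nil
    · rw [PySem.Dict.keys_empty]; exact List.Forall₂.nil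
  have hloop := fin_loop htop (tuples.foldl aGroup PySem.Dict.empty).keys
    (fun z hz => by rwa [htop.1] at hz) (tuples.foldl aGroup PySem.Dict.empty)
    PySem.Dict.empty PySem.Dict.empty hInv0
  have hvals := values_eq_of_fininv hloop
  show group_related_images tuples = group_related_images_alt tuples
  have hAeq : group_related_images tuples =
      ((tuples.foldl aGroup PySem.Dict.empty).keys.foldl aFinStep
        (tuples.foldl aGroup PySem.Dict.empty, PySem.Dict.empty)).2.values := rfl
  have hBeq : group_related_images_alt tuples =
      ((tuples.foldl bGroup ⟨PySem.Dict.empty, PySem.Dict.empty, [], 0⟩).order.foldl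
        (fun C z => (C.setdefault
            ((tuples.foldl bGroup ⟨PySem.Dict.empty, PySem.Dict.empty, [], 0⟩).label.getD z 0)
            []).modify
          ((tuples.foldl bGroup ⟨PySem.Dict.empty, PySem.Dict.empty, [], 0⟩).label.getD z 0)
          [] (· ++ [z])) PySem.Dict.empty).values := rfl
  rw [hAeq, hBeq, ← htop.1]
  exact hvals
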